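-- pv_equiv track=rewrite | github.com/azizspimaco-lang/workflowmanager | src/main.py | _slugify_filename
-- ===== SOURCE A (Python) =====
-- import unicodedata
--
-- def _slugify_filename(s: str, maxlen: int = 80) -> str:
--     """Convertit un texte en nom de fichier safe (ASCII, sans caractères spéciaux)."""
--     s = (s or "").strip()
--     if not s:
--         return "document"
--     s = unicodedata.normalize("NFKD", s)
--     s = s.encode("ascii", "ignore").decode("ascii")
--     s = "".join(ch if (ch.isalnum() or ch in ("-", "_")) else "_" for ch in s)
--     while "__" in s:
--         s = s.replace("__", "_")
--     s = s.strip("_-")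
--     return (s or "document")[:maxlen]
-- ===== SOURCE B (Python) =====
-- import unicodedata
--
-- def _slugify_filename(s: str, maxlen: int = 80) -> str:
--     """Convertit un texte en nom de fichier safe (ASCII, sans caractères spéciaux)."""
--     s = (s or "").strip()
--     if not s:
--         return "document"
--     s = unicodedata.normalize("NFKD", s)
--     s = s.encode("ascii", "ignore").decode("ascii")
--     out = []
--     last = ""
--     for ch in s:
--         c = ch if (ch.isalnum() or ch == "-") else "_"
--         if c == "_" and last == "_":
--             continue
--         out.append(c)
--         last = c
--     t = "".join(out).strip("_-")
--     return (t or "document")[:maxlen]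
-- ===== Notes on version B (the rewrite author's own statement) =====
-- stated objective: alternative
-- what changed: Replaces A's filter pass plus repeated whole-string replace rescans that collapse doubled underscores with a single stateful pass that never emits two consecutive underscores.
import Mathlib
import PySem

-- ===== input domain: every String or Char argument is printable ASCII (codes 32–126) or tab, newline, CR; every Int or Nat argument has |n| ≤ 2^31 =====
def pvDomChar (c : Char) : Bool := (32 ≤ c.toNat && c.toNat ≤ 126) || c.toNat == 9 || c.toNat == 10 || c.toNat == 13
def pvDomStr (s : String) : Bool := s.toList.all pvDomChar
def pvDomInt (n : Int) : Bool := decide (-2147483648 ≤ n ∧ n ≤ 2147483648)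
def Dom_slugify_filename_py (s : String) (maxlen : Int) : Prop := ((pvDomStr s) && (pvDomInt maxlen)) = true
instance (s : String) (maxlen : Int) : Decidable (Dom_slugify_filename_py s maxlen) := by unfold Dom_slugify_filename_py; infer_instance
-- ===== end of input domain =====

-- B merges A's filter pass and A's repeated replace-rescan loop (collapsing doubled underscores) into one
-- stateful pass that never emits '_' after '_' (objective: alternative decomposition).

-- ===== PORT A =====
-- What one pass of s.replace("__","_") computes; used only to justify the
-- termination of the while-loop port below (cited by name in decreasing_by).
def pvRrep : List Char → List Char
  | [] => []
  | [c] => [c]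
  | a :: b :: t => if a = '_' ∧ b = '_' then '_' :: pvRrep t else a :: pvRrep (b :: t)

theorem pvRrep_len_le (l : List Char) : (pvRrep l).length ≤ l.length := by
  fun_induction pvRrep l with
  | case1 => simp
  | case2 => simp [pvRrep]
  | case3 a b t h ih => simp [pvRrep, h]; omega
  | case4 a b t h ih => simp only [pvRrep, if_neg h] at *; simp at *; omega

theorem pvGo (fuel : Nat) (l acc : List Char) (h : l.length ≤ fuel) :
    PySem.Chars.replace.go ['_','_'] ['_'] fuel l acc = acc.reverse ++ pvRrep l := by
  induction fuel generalizing l acc with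
  | zero =>
    have : l = [] := by cases l <;> simp_all
    subst this
    rw [PySem.Chars.replace.go.eq_def]; simp [pvRrep]
  | succ n ih =>
    cases l with
    | nil => rw [PySem.Chars.replace.go.eq_def]; simp [pvRrep]
    | cons c t =>
      rw [PySem.Chars.replace.go.eq_def]
      by_cases hp : List.isPrefixOf ['_','_'] (c::t) = true
      · cases t with
        | nil => simp [List.isPrefixOf] at hp
        | cons b u =>
          obtain ⟨rfl, rfl⟩ : '_' = c ∧ '_' = b := by simpa [List.isPrefixOf] using hp
          have := ih u ('_'::acc) (by simp at h ⊢; omega)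
          simp [pvRrep, hp, this]
      · simp only [hp]
        simp only [Bool.false_eq_true, if_false]
        rw [ih t (c::acc) (by simp at h ⊢; omega)]
        have hr : pvRrep (c :: t) = c :: pvRrep t := by
          cases t with
          | nil => simp [pvRrep]
          | cons b u =>
            have h2 : ¬ (c = '_' ∧ b = '_') := by
              intro ⟨h1, h2⟩; subst h1; subst h2; simp [List.isPrefixOf] at hp
            simp [pvRrep, h2]
        rw [hr]; simp

theorem pvReplace_eq_rrep (l : List Char) :
    PySem.Chars.replace l ['_', '_'] ['_'] = pvRrep l := by
  rw [PySem.Chars.replace]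
  simp only [List.isEmpty_cons, Bool.false_eq_true, if_false]
  exact pvGo l.length l [] (le_refl _)

theorem pvRrep_length_lt (l : List Char) (h : ['_','_'] <:+: l) :
    (pvRrep l).length < l.length := by
  induction l with
  | nil => simp at h
  | cons c t ih =>
    rcases (List.infix_cons_iff.mp h) with hp | hi
    · obtain ⟨u, hu⟩ := hp
      cases t with
      | nil => simp_all
      | cons b v =>
        simp only [List.cons_append, List.cons.injEq] at hu
        obtain ⟨rfl, rfl, _⟩ := hu
        have := pvRrep_len_le v
        simp [pvRrep]; omega
    · cases t with
      | nil => simp at hi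
      | cons b v =>
        by_cases hab : c = '_' ∧ b = '_'
        · have := pvRrep_len_le v
          simp [pvRrep, hab, hab.1]; omega
        · have := ih hi
          simp only [pvRrep, if_neg hab] at *; simp at *; omega

-- the Python loop  while "__" in s: s = s.replace("__", "_")
def pvCollapse (l : List Char) : List Char :=
  if PySem.Chars.isIn ['_', '_'] l then pvCollapse (PySem.Chars.replace l ['_', '_'] ['_']) else l
termination_by l.length
decreasing_by
  rw [pvReplace_eq_rrep]
  exact pvRrep_length_lt l ((PySem.Chars.isIn_iff_infix _ _).mp (by assumption))

-- NFKD normalization and the ascii encode/decode round trip are the identity on the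
-- ASCII input domain (exact there), so they leave no trace in the port.
def slugify_filename_py (s : String) (maxlen : Int) : String :=
  let s1 := PySem.Str.strip s
  if s1.toList.isEmpty then "document"
  else
    let m := s1.toList.map (fun ch =>
      if PySem.Chars.isalnum ch || ch == '-' || ch == '_' then ch else '_')
    let m2 := pvCollapse m
    let m3 := PySem.Chars.stripChars m2 ['_', '-']
    String.ofList (PySem.List.slice (if m3.isEmpty then "document".toList else m3) none (some maxlen))

-- ===== PORT B =====
def slugify_filename_py_alt (s : String) (maxlen : Int) : String :=
  let s1 := PySem.Str.strip s
  if s1.toList.isEmpty then "document"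
  else
    let st := s1.toList.foldl (fun (st : List Char × Option Char) ch =>
      let c := if PySem.Chars.isalnum ch || ch == '-' then ch else '_'
      if c == '_' && st.2 == some '_' then st else (st.1 ++ [c], some c)) ([], none)
    let t := PySem.Chars.stripChars st.1 ['_', '-']
    String.ofList (PySem.List.slice (if t.isEmpty then "document".toList else t) none (some maxlen))

-- ===== PRECONDITION & SPEC =====
def Spec_slugify_filename_py (s : String) (maxlen : Int) (out : String) : Prop := out = slugify_filename_py_alt s maxlen
instance (s : String) (maxlen : Int) (out : String) : Decidable (Spec_slugify_filename_py s maxlen out) := by unfold Spec_slugify_filename_py; infer_instance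

-- ===== CLAIM (what is proved, stated in full; the proofs are below) =====
def Claim_equal_slugify_filename_py : Prop := ∀ (s : String) (maxlen : Int), Dom_slugify_filename_py s maxlen → Spec_slugify_filename_py s maxlen (slugify_filename_py s maxlen)

-- ===== LEMMAS AND PROOFS =====

theorem pvRrep_head (a : Char) (l : List Char) : ∃ v, pvRrep (a :: l) = a :: v := by
  cases l with
  | nil => exact ⟨[], by simp [pvRrep]⟩
  | cons b u =>
    by_cases h : a = '_' ∧ b = '_'
    · exact ⟨pvRrep u, by simp [pvRrep, h, h.1]⟩
    · exact ⟨pvRrep (b::u), by simp [pvRrep, h]⟩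

-- dropWhile underscores commutes with one replace pass
theorem pvDropWhile_rrep (l : List Char) :
    (pvRrep l).dropWhile (· == '_') = pvRrep (l.dropWhile (· == '_')) := by
  induction hn : l.length using Nat.strong_induction_on generalizing l with
  | _ n ih =>
  subst hn
  match l with
  | [] => simp [pvRrep]
  | c :: t =>
    by_cases hc : c = '_'
    · subst hc
      match t with
      | [] => simp [pvRrep]
      | b :: u =>
        by_cases hb : b = '_'
        · subst hb
          have h1 : pvRrep ('_' :: '_' :: u) = '_' :: pvRrep u := by simp [pvRrep]
          rw [h1]
          have h2 : ('_' :: pvRrep u).dropWhile (· == '_') = (pvRrep u).dropWhile (· == '_') := by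
            simp [List.dropWhile]
          rw [h2, ih u.length (by simp) u rfl]
          simp [List.dropWhile]
        · have h1 : pvRrep ('_' :: b :: u) = '_' :: pvRrep (b :: u) := by
            simp only [pvRrep]; rw [if_neg (fun h => hb h.2)]
          obtain ⟨v, hv⟩ := pvRrep_head b u
          rw [h1]
          have h2 : ('_' :: pvRrep (b :: u)).dropWhile (· == '_') = pvRrep (b :: u) := by
            simp [List.dropWhile, hv, hb]
          rw [h2]
          have h3 : ('_' :: b :: u).dropWhile (· == '_') = b :: u := by
            simp [List.dropWhile_cons, hb]
          rw [h3]
    · obtain ⟨v, hv⟩ := pvRrep_head c t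
      have h2 : (pvRrep (c :: t)).dropWhile (· == '_') = pvRrep (c :: t) := by
        simp [List.dropWhile, hv, hc]
      have h3 : (c :: t).dropWhile (· == '_') = c :: t := by
        simp [List.dropWhile_cons, hc]
      rw [h2, h3]

-- collapse each maximal run of underscores to a single one
def pvSqueeze : List Char → List Char
  | [] => []
  | c :: t =>
    if c = '_' then '_' :: pvSqueeze (t.dropWhile (· == '_'))
    else c :: pvSqueeze t
termination_by l => l.length
decreasing_by
  · exact Nat.lt_succ_of_le (List.length_dropWhile_le _ _)
  · simp

theorem pvSqueeze_cons_u (t : List Char) :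
    pvSqueeze ('_' :: t) = '_' :: pvSqueeze (t.dropWhile (· == '_')) := by
  rw [pvSqueeze]; simp

theorem pvSqueeze_cons_ne (c : Char) (t : List Char) (hc : ¬ c = '_') :
    pvSqueeze (c :: t) = c :: pvSqueeze t := by
  rw [pvSqueeze]; simp [hc]

theorem pvRrep_cons_ne (c : Char) (t : List Char) (hc : ¬ c = '_') :
    pvRrep (c :: t) = c :: pvRrep t := by
  cases t with
  | nil => simp [pvRrep]
  | cons b u => simp only [pvRrep]; rw [if_neg (fun h => hc h.1)]

theorem pvSqueeze_rrep (l : List Char) : pvSqueeze (pvRrep l) = pvSqueeze l := by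
  induction hn : l.length using Nat.strong_induction_on generalizing l with
  | _ n ih =>
  subst hn
  match l with
  | [] => simp [pvRrep]
  | c :: t =>
    by_cases hc : c = '_'
    · subst hc
      match t with
      | [] => simp [pvRrep]
      | b :: u =>
        by_cases hb : b = '_'
        · subst hb
          have h1 : pvRrep ('_' :: '_' :: u) = '_' :: pvRrep u := by simp [pvRrep]
          rw [h1, pvSqueeze_cons_u, pvSqueeze_cons_u, pvDropWhile_rrep u,
            ih _ (by have := List.length_dropWhile_le (· == '_') u; simp; omega) _ rfl]
          simp [List.dropWhile_cons]
        · have h1 : pvRrep ('_' :: b :: u) = '_' :: pvRrep (b :: u) := by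
            simp only [pvRrep]; rw [if_neg (fun h => hb h.2)]
          obtain ⟨v, hv⟩ := pvRrep_head b u
          have h2 : (pvRrep (b :: u)).dropWhile (· == '_') = pvRrep (b :: u) := by
            rw [hv]; simp [List.dropWhile_cons, hb]
          rw [h1, pvSqueeze_cons_u, pvSqueeze_cons_u, h2,
            ih _ (by simp) _ rfl]
          simp [List.dropWhile_cons, hb]
    · rw [pvRrep_cons_ne c t hc, pvSqueeze_cons_ne c _ hc, pvSqueeze_cons_ne c t hc,
        ih _ (by simp) _ rfl]

theorem pvSqueeze_of_not_infix (l : List Char) (h : ¬ ['_','_'] <:+: l) :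
    pvSqueeze l = l := by
  induction l with
  | nil => rw [pvSqueeze]
  | cons c t ih =>
    have ht : ¬ ['_','_'] <:+: t := fun hi => h (hi.trans (List.suffix_cons c t).isInfix)
    by_cases hc : c = '_'
    · subst hc
      have hd : t.dropWhile (· == '_') = t := by
        cases t with
        | nil => simp
        | cons b u =>
          have hb : ¬ b = '_' := by
            intro rfl'
            exact h (List.infix_cons_iff.mpr (Or.inl ⟨u, by simp [rfl']⟩))
          simp [List.dropWhile_cons, hb]
      rw [pvSqueeze_cons_u, hd, ih ht]
    · rw [pvSqueeze_cons_ne c t hc, ih ht]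

theorem pvCollapse_eq_squeeze (l : List Char) : pvCollapse l = pvSqueeze l := by
  induction hn : l.length using Nat.strong_induction_on generalizing l with
  | _ n ih =>
  subst hn
  rw [pvCollapse]
  by_cases h : PySem.Chars.isIn ['_','_'] l = true
  · rw [if_pos h, pvReplace_eq_rrep] at *
    rw [ih _ (pvRrep_length_lt l ((PySem.Chars.isIn_iff_infix _ _).mp h)) _ rfl]
    exact pvSqueeze_rrep l
  · rw [if_neg h]
    exact (pvSqueeze_of_not_infix l (fun hi => h ((PySem.Chars.isIn_iff_infix _ _).mpr hi))).symm

theorem pvFold_aux (m out : List Char) :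
    (m.foldl (fun (st : List Char × Option Char) c =>
        if c == '_' && st.2 == some '_' then st else (st.1 ++ [c], some c)) (out, some '_')).1
      = out ++ pvSqueeze (m.dropWhile (· == '_')) ∧
    (∀ last : Option Char, last ≠ some '_' →
      (m.foldl (fun (st : List Char × Option Char) c =>
        if c == '_' && st.2 == some '_' then st else (st.1 ++ [c], some c)) (out, last)).1
      = out ++ pvSqueeze m) := by
  induction m generalizing out with
  | nil => simp [pvSqueeze]
  | cons c t ih =>
    constructor
    · by_cases hc : c = '_'
      · subst hc
        have hcond : (('_' : Char) == '_' && (some '_' : Option Char) == some '_') = true := by simp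
        rw [List.foldl_cons, hcond, if_pos rfl, (ih out).1]
        simp [List.dropWhile_cons]
      · have hcond : ((c : Char) == '_' && (some '_' : Option Char) == some '_') = false := by simp [hc]
        rw [List.foldl_cons, hcond]
        simp only [Bool.false_eq_true, if_false]
        rw [((ih (out ++ [c])).2 (some c) (by simp [hc])), List.dropWhile_cons]
        simp [hc, pvSqueeze_cons_ne c t hc]
    · intro last hlast
      by_cases hc : c = '_'
      · subst hc
        have hcond : (('_' : Char) == '_' && last == some '_') = false := by
          cases last with
          | none => simp
          | some a =>
            have : ¬ a = '_' := fun h => hlast (by rw [h])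
            simp [this]
        rw [List.foldl_cons, hcond]
        simp only [Bool.false_eq_true, if_false]
        rw [(ih (out ++ ['_'])).1, pvSqueeze_cons_u]
        simp
      · have hcond : ((c : Char) == '_' && last == some '_') = false := by simp [hc]
        rw [List.foldl_cons, hcond]
        simp only [Bool.false_eq_true, if_false]
        rw [((ih (out ++ [c])).2 (some c) (by simp [hc])), pvSqueeze_cons_ne c t hc]
        simp

-- the two per-character maps agree ('_' is fixed by both)
theorem pvMap_congr (ch : Char) :
    (if PySem.Chars.isalnum ch || ch == '-' || ch == '_' then ch else '_')
      = (if PySem.Chars.isalnum ch || ch == '-' then ch else '_') := by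
  by_cases h : ch = '_'
  · subst h; by_cases h2 : (PySem.Chars.isalnum '_' || '_' == '-') = true <;> simp_all
  · simp [h]

theorem pvCore (l : List Char) :
    pvCollapse (l.map (fun ch =>
        if PySem.Chars.isalnum ch || ch == '-' || ch == '_' then ch else '_'))
      = (l.foldl (fun (st : List Char × Option Char) ch =>
          let c := if PySem.Chars.isalnum ch || ch == '-' then ch else '_'
          if c == '_' && st.2 == some '_' then st else (st.1 ++ [c], some c)) ([], none)).1 := by
  have h1 : l.map (fun ch => if PySem.Chars.isalnum ch || ch == '-' || ch == '_' then ch else '_')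
      = l.map (fun ch => if PySem.Chars.isalnum ch || ch == '-' then ch else '_') :=
    List.map_congr_left (fun ch _ => pvMap_congr ch)
  rw [h1, pvCollapse_eq_squeeze]
  have h2 := (pvFold_aux (l.map (fun ch => if PySem.Chars.isalnum ch || ch == '-' then ch else '_')) []).2 none (by simp)
  simp only [List.nil_append] at h2
  rw [← h2, List.foldl_map]

-- ===== VERDICT (by name: the statement is the Claim_ definition above) =====
theorem slugify_filename_py_spec : Claim_equal_slugify_filename_py := by
  intro s maxlen _
  unfold Spec_slugify_filename_py slugify_filename_py slugify_filename_py_alt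
  simp only [pvCore]
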